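-- pv_equiv track=rewrite | github.com/MrBrantCode/unitest_baseline | mut_generate/mist_train_taco/taco_19394/solution.py | count_nodes_before_exit
-- ===== SOURCE A (Python) =====
-- def count_nodes_before_exit(h: int, n: int) -> int:
--     """
--     Calculates the number of nodes visited before reaching the exit in a perfect binary tree of height h,
--     where the exit is located at the nth leaf node from the left.
--
--     Parameters:
--     h (int): The height of the binary tree (1 ≤ h ≤ 50).
--     n (int): The position of the exit node among the leaf nodes (1 ≤ n ≤ 2^h).
--
--     Returns:
--     int: The number of nodes visited before reaching the exit.
--     """
--     height_nodes = [1 for _ in range(51)]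
--     for height in range(1, 51):
--         height_nodes[height] = 2 ** height + height_nodes[height - 1]
--
--     cur_pos = 2 ** (h - 1)
--     depth = h
--     add = 2 ** (h - 1)
--     direction = -1
--     total = 0
--
--     while True:
--         if depth == 0:
--             break
--         if (cur_pos >= n and direction == -1) or (cur_pos < n and direction == 1):
--             total += 1
--             depth -= 1
--             add //= 2
--             cur_pos += direction * add
--         else:
--             total += height_nodes[depth - 1]
--         direction *= -1
--
--     return total
-- ===== SOURCE B (Python) =====
-- def count_nodes_before_exit(h: int, n: int) -> int:
--     """Same task, recast as a single downward recursion over the levels: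
--     at each level either step into the near child (cost 1) or engulf the
--     far subtree and then step (cost 2**d), using the closed form 2**d - 1
--     for a subtree instead of the height_nodes table."""
--     def go(cur, d, dirn):
--         if d <= 0:
--             return 0
--         half = 2 ** (d - 1) // 2
--         near = (cur >= n) if dirn == -1 else (cur < n)
--         if near:
--             return 1 + go(cur + dirn * half, d - 1, -dirn)
--         else:
--             return 2 ** d + go(cur - dirn * half, d - 1, dirn)
--     return go(2 ** (h - 1), h, -1)
-- ===== Notes on version B (the rewrite author's own statement) =====
-- stated objective: simpler
-- what changed: B replaces A's precomputed 51-entry height_nodes table and direction-flipping while-loop by a single downward recursion over the levels that either steps into the near child (cost 1) or engulfs the far subtree and steps (cost 2**d, the closed form for the subtree plus the step), so the table and the non-descending loop iterations disappear.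
import Mathlib
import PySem

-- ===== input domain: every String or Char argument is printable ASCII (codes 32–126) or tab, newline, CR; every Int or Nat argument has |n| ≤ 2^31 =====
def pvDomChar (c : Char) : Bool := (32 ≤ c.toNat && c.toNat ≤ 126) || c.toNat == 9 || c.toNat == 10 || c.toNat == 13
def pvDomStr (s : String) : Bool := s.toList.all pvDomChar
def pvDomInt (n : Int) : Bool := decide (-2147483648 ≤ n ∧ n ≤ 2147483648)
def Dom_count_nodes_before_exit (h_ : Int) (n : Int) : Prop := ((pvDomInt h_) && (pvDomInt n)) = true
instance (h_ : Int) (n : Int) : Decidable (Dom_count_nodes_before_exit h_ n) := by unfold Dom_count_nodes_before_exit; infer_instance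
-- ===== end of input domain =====

-- B replaces A's while-loop + precomputed height_nodes table by a single downward
-- recursion over the levels using the closed form 2^d for an engulfed subtree plus
-- the step into it (objective: simpler).

-- ===== PORT A =====
-- height_nodes = [1]*51; for height in range(1,51): height_nodes[height] = 2**height + height_nodes[height-1]
def pyHeightNodes : List Int :=
  (PySem.List.pyRange 1 51 1).foldl
    (fun l height => l.set height.toNat ((2:Int) ^ height.toNat + l.getD (height.toNat - 1) 0))
    (List.replicate 51 (1 : Int))

-- the while-loop; fuel is only a totality guard (the Python loop is `while True`),
-- 2*h+1 iterations always suffice on Pre_.  depth is kept as a Nat (it starts at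
-- h ≥ 0 on Pre_ and only ever decreases towards the `depth == 0` break).
def loopA (n : Int) (fuel : Nat) (cur : Int) (depth : Nat) (add dir total : Int) : Int :=
  match fuel with
  | 0 => total
  | fuel + 1 =>
    if depth = 0 then total
    else if (decide (n ≤ cur) && dir == -1) || (decide (cur < n) && dir == 1) then
      let add' := PySem.Int.floordiv add 2
      loopA n fuel (cur + dir * add') (depth - 1) add' (dir * -1) (total + 1)
    else
      -- height_nodes[depth-1]; in-range on Pre_, the getD 0 only makes the port total
      loopA n fuel cur depth add (dir * -1)
        (total + (PySem.List.pyGet? pyHeightNodes ((depth : Int) - 1)).getD 0)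

def count_nodes_before_exit (h_ : Int) (n : Int) : Int :=
  -- cur_pos = add = 2**(h-1); for h = 0 Python's 2**(-1) is an unused float (depth = 0
  -- breaks immediately), so the integer stand-in below is never read there.
  loopA n (2 * h_.toNat + 1) ((2:Int) ^ (h_ - 1).toNat) h_.toNat ((2:Int) ^ (h_ - 1).toNat) (-1) 0

-- ===== PORT B =====
def goB (n : Int) (cur : Int) (d : Nat) (dir : Int) : Int :=
  match d with
  | 0 => 0
  | d + 1 =>
    let half := PySem.Int.floordiv ((2:Int) ^ d) 2      -- 2**(d-1)//2 at level d+1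
    let near := if dir == -1 then decide (n ≤ cur) else decide (cur < n)
    if near then 1 + goB n (cur + dir * half) d (-dir)
    else (2:Int) ^ (d + 1) + goB n (cur - dir * half) d dir

def count_nodes_before_exit_alt (h_ : Int) (n : Int) : Int :=
  goB n ((2:Int) ^ (h_ - 1).toNat) h_.toNat (-1)

-- ===== PRECONDITION & SPEC =====
-- On the whole domain |n| ≤ 2^31 A returns exactly for 0 ≤ h ≤ 52 (its documented
-- domain is 1 ≤ h ≤ 50): for h ≥ 53 its 51-entry height_nodes table raises
-- IndexError, and for h < 0 the loop never reaches depth == 0 and never returns.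
def Pre_count_nodes_before_exit (h_ : Int) (n : Int) : Prop := 0 ≤ h_ ∧ h_ ≤ 52
instance (h_ : Int) (n : Int) : Decidable (Pre_count_nodes_before_exit h_ n) := by
  unfold Pre_count_nodes_before_exit; infer_instance

def pvWitness_count_nodes_before_exit : Int × Int := (3, 2)

def Spec_count_nodes_before_exit (h_ : Int) (n : Int) (out : Int) : Prop := out = count_nodes_before_exit_alt h_ n
instance (h_ : Int) (n : Int) (out : Int) : Decidable (Spec_count_nodes_before_exit h_ n out) := by unfold Spec_count_nodes_before_exit; infer_instance

-- ===== CLAIM (what is proved, stated in full; the proofs are below) =====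
def Claim_equal_count_nodes_before_exit : Prop := ∀ (h_ : Int) (n : Int), Dom_count_nodes_before_exit h_ n → Pre_count_nodes_before_exit h_ n → Spec_count_nodes_before_exit h_ n (count_nodes_before_exit h_ n)

-- ===== LEMMAS AND PROOFS =====

-- the table entry height_nodes[k] is 2^(k+1) - 1
lemma pyHeightNodes_getD : ∀ k : Nat, k < 51 →
    pyHeightNodes[k]?.getD 0 = 2 ^ (k + 1) - 1 := by
  decide

lemma pow_div_two (d : Nat) (hd : d ≠ 0) : (2:Int) ^ d / 2 = (2:Int) ^ (d - 1) := by
  obtain ⟨e, rfl⟩ : ∃ e, d = e + 1 := ⟨d - 1, by omega⟩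
  rw [pow_succ]
  simp

lemma loopA_eq_goB (n : Int) : ∀ (d : Nat) (fuel : Nat) (cur add dir total : Int),
    d ≤ 51 → (dir = -1 ∨ dir = 1) → (d ≠ 0 → add = 2 ^ (d - 1)) → 2 * d + 1 ≤ fuel →
    loopA n fuel cur d add dir total = total + goB n cur d dir := by
  intro d
  induction d with
  | zero =>
    intro fuel cur add dir total _ _ _ hfuel
    obtain ⟨f, rfl⟩ : ∃ f, fuel = f + 1 := ⟨fuel - 1, by omega⟩
    simp [loopA, goB]
  | succ d ih =>
    intro fuel cur add dir total hle hdir hadd hfuel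
    obtain ⟨f, rfl⟩ : ∃ f, fuel = f + 1 := ⟨fuel - 1, by omega⟩
    have hadd' : add = 2 ^ d := by simpa using hadd (by omega)
    subst hadd'
    have htab : pyHeightNodes[d]?.getD 0 = (2:Int) ^ (d + 1) - 1 :=
      pyHeightNodes_getD d (by omega)
    rcases hdir with hdir | hdir <;> subst hdir
    · -- dir = -1
      by_cases hc : n ≤ cur
      · -- descend
        rw [loopA, goB]
        simp only [hc, decide_true]
        norm_num
        rw [ih f _ _ _ _ (by omega) (Or.inr rfl) (pow_div_two d) (by omega)]
        ring
      · -- engulf subtree, then the flipped direction descends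
        rw [loopA]
        simp only [hc, decide_false]
        norm_num
        obtain ⟨f', rfl⟩ : ∃ f', f = f' + 1 := ⟨f - 1, by omega⟩
        rw [loopA]
        have hlt : cur < n := by omega
        simp only [hc, hlt, decide_false, decide_true]
        norm_num
        rw [goB]
        simp only [hc, decide_false]
        norm_num
        rw [ih f' _ _ _ _ (by omega) (Or.inl rfl) (pow_div_two d) (by omega), htab]
        ring
    · -- dir = 1 (mirror)
      by_cases hc : cur < n
      · rw [loopA, goB]
        simp only [hc, decide_true]
        norm_num
        rw [ih f _ _ _ _ (by omega) (Or.inl rfl) (pow_div_two d) (by omega)]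
        ring
      · rw [loopA]
        simp only [hc, decide_false]
        norm_num
        obtain ⟨f', rfl⟩ : ∃ f', f = f' + 1 := ⟨f - 1, by omega⟩
        rw [loopA]
        have hge : n ≤ cur := by omega
        simp only [hc, hge, decide_false, decide_true]
        norm_num
        rw [goB]
        simp only [hc, decide_false]
        norm_num
        rw [ih f' _ _ _ _ (by omega) (Or.inr rfl) (pow_div_two d) (by omega), htab]
        ring

-- ===== VERDICT (by name: the statement is the Claim_ definition above) =====
theorem count_nodes_before_exit_spec : Claim_equal_count_nodes_before_exit := by
  intro h_ n hdom hpre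
  obtain ⟨h0, h52⟩ := hpre
  unfold Spec_count_nodes_before_exit count_nodes_before_exit count_nodes_before_exit_alt
  have hadd : h_.toNat ≠ 0 → (2:Int) ^ (h_ - 1).toNat = 2 ^ (h_.toNat - 1) := by
    intro hne
    congr 1
    omega
  by_cases hb : h_.toNat ≤ 51
  · rw [loopA_eq_goB n h_.toNat _ _ _ _ _ hb (Or.inl rfl) hadd (by omega)]
    ring
  · -- h = 52: the first iteration descends (cur = 2^51 ≥ n on Dom), then d = 51
    have h52' : h_ = 52 := by omega
    subst h52'
    have hn : n ≤ 2147483648 := by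
      have hd := hdom
      unfold Dom_count_nodes_before_exit pvDomInt at hd
      simp only [Bool.and_eq_true, decide_eq_true_eq] at hd
      exact hd.2.2
    have htn : 2 * (52:Int).toNat + 1 = 104 + 1 := by decide
    have htn2 : (52:Int).toNat = 51 + 1 := by decide
    have h511 : ((52:Int) - 1).toNat = 51 := by decide
    rw [htn, htn2, h511, loopA, goB]
    norm_num
    have hcc : n ≤ (2251799813685248:Int) := by omega
    rw [if_pos hcc, if_pos hcc]
    rw [loopA_eq_goB n 51 104 _ _ _ _ (by omega) (Or.inr rfl) (fun _ => by norm_num) (by omega)]
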